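-- pv_equiv track=rewrite | github.com/oldwizard7/CS639-NLP | tought_anchors/masking_graphs/resample/supp.py | find_clipped_bounds
-- ===== SOURCE A (Python) =====
-- def find_clipped_bounds(s0, s1):
--     """
--     Find the start and end indices in s0 where a substring was removed to create s1.
--
--     Args:
--         s0 (str): Original string
--         s1 (str): String with a portion clipped from the middle of s0
--
--     Returns:
--         tuple: (start_index, end_index) where the substring was removed from s0
--                Returns None if s1 is not a valid clipped version of s0
--     """
--     # Check if s1 could be a clipped version of s0
--     if len(s1) > len(s0):
--         return None
--
--     # If strings are identical, no clipping occurred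
--     if s0 == s1:
--         return None
--
--     # Find the longest common prefix
--     prefix_len = 0
--     for i in range(min(len(s0), len(s1))):
--         if s0[i] == s1[i]:
--             prefix_len += 1
--         else:
--             break
--
--     # Find the longest common suffix
--     suffix_len = 0
--     for i in range(1, min(len(s0), len(s1)) - prefix_len + 1):
--         if s0[-i] == s1[-i]:
--             suffix_len += 1
--         else:
--             break
--
--     # Calculate the clipped region boundaries
--     clip_start = prefix_len
--     clip_end = len(s0) - suffix_len - 1
--
--     # Verify that this is a valid clipping
--     # The reconstructed string should match s1
--     reconstructed = s0[:clip_start] + s0[clip_end + 1 :]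
--     if reconstructed != s1:
--         return None
--
--     return (clip_start, clip_end)
-- ===== SOURCE B (Python) =====
-- def find_clipped_bounds(s0, s1):
--     """
--     Find the start and end indices in s0 where a substring was removed to create s1.
--     Returns (start_index, end_index), or None if s1 is not a valid clipped version of s0.
--     """
--     if len(s1) > len(s0):
--         return None
--     if s0 == s1:
--         return None
--     m = len(s0) - len(s1)
--     # longest common prefix length: first mismatching position, else len(s1)
--     p = next((i for i, (a, b) in enumerate(zip(s0, s1)) if a != b), len(s1))
--     # the removed block has length exactly m; the rest must align
--     if s0[p + m:] == s1[p:]: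
--         return (p, p + m - 1)
--     return None
-- ===== Notes on version B (the rewrite author's own statement) =====
-- stated objective: simpler
-- what changed: B drops A's backward suffix-scan loop and its reconstruct-and-compare step: since the removed block must have length exactly len(s0)-len(s1), B computes only the common prefix length p and checks the single slice equality s0[p+m:] == s1[p:].
import Mathlib
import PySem

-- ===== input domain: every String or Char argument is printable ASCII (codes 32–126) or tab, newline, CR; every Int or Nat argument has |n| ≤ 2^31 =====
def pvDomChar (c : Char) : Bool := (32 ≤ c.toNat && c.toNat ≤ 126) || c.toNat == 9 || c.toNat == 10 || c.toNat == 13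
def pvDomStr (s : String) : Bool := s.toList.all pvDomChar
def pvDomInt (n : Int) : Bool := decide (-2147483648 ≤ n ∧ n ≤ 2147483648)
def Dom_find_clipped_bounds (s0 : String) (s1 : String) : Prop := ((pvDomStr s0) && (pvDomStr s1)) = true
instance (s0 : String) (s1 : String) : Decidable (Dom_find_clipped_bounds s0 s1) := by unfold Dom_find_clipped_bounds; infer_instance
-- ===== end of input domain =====

-- B replaces A's backward suffix-scan loop and reconstruct-and-compare step by a single
-- slice-equality check (the removed block's length is forced to be len(s0)-len(s1)); objective: simpler.


-- ===== PORT A =====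
-- A's prefix loop: for i in range(min): if s0[i]==s1[i]: prefix_len += 1 else break
def prefLoop (l0 l1 : List Char) : Nat → Nat → Nat
  | _, 0 => 0
  | i, n+1 =>
    if PySem.List.pyGet? l0 (i : Int) = PySem.List.pyGet? l1 (i : Int) then
      1 + prefLoop l0 l1 (i+1) n
    else 0

-- A's suffix loop: for i in range(1, min - prefix_len + 1): if s0[-i]==s1[-i]: suffix_len += 1 else break
def sufLoop (l0 l1 : List Char) : Nat → Nat → Nat
  | _, 0 => 0
  | i, n+1 =>
    if PySem.List.pyGet? l0 (-(i : Int)) = PySem.List.pyGet? l1 (-(i : Int)) then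
      1 + sufLoop l0 l1 (i+1) n
    else 0

def find_clipped_bounds (s0 : String) (s1 : String) : Option (Int × Int) :=
  let l0 := s0.toList
  let l1 := s1.toList
  if l1.length > l0.length then none
  else if l0 = l1 then none
  else
    let prefixLen := prefLoop l0 l1 0 (min l0.length l1.length)
    let suffixLen := sufLoop l0 l1 1 (min l0.length l1.length - prefixLen)
    let clipStart : Int := prefixLen
    let clipEnd : Int := (l0.length : Int) - suffixLen - 1
    let reconstructed := PySem.List.slice l0 none (some clipStart) ++ PySem.List.slice l0 (some (clipEnd + 1)) none
    if reconstructed ≠ l1 then none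
    else some (clipStart, clipEnd)

-- ===== PORT B =====
def find_clipped_bounds_alt (s0 : String) (s1 : String) : Option (Int × Int) :=
  let l0 := s0.toList
  let l1 := s1.toList
  if l1.length > l0.length then none
  else if l0 = l1 then none
  else
    let m : Int := (l0.length : Int) - (l1.length : Int)
    let p : Int := ((((l0.zip l1).findIdx? (fun ab => ab.1 != ab.2)).getD l1.length : Nat) : Int)
    if PySem.List.slice l0 (some (p + m)) none = PySem.List.slice l1 (some p) none then
      some (p, p + m - 1)
    else none

-- ===== PRECONDITION & SPEC =====
def Spec_find_clipped_bounds (s0 : String) (s1 : String) (out : Option (Int × Int)) : Prop := out = find_clipped_bounds_alt s0 s1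
instance (s0 : String) (s1 : String) (out : Option (Int × Int)) : Decidable (Spec_find_clipped_bounds s0 s1 out) := by unfold Spec_find_clipped_bounds; infer_instance

-- ===== CLAIM (what is proved, stated in full; the proofs are below) =====
def Claim_equal_find_clipped_bounds : Prop := ∀ (s0 : String) (s1 : String), Dom_find_clipped_bounds s0 s1 → Spec_find_clipped_bounds s0 s1 (find_clipped_bounds s0 s1)

-- ===== LEMMAS AND PROOFS =====

-- longest-common-prefix length, the common reference of both ports' prefix computations
def lcp : List Char → List Char → Nat
  | a :: as, b :: bs => if a = b then lcp as bs + 1 else 0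
  | _, _ => 0

theorem lcp_le : ∀ (l0 l1 : List Char), lcp l0 l1 ≤ min l0.length l1.length := by
  intro l0
  induction l0 with
  | nil => intro l1; cases l1 <;> simp [lcp]
  | cons a as ih =>
    intro l1
    cases l1 with
    | nil => simp [lcp]
    | cons b bs =>
      simp only [lcp, List.length_cons]
      split
      · have := ih bs; omega
      · omega

theorem take_lcp : ∀ (l0 l1 : List Char), l0.take (lcp l0 l1) = l1.take (lcp l0 l1) := by
  intro l0
  induction l0 with
  | nil => intro l1; cases l1 <;> simp [lcp]
  | cons a as ih =>
    intro l1
    cases l1 with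
    | nil => simp [lcp]
    | cons b bs =>
      simp only [lcp]
      split
      · next h => simp [List.take_succ_cons, h, ih bs]
      · simp

theorem prefLoop_eq_min (l0 l1 : List Char) :
    ∀ (n i : Nat), i + n ≤ min l0.length l1.length →
      prefLoop l0 l1 i n = min (lcp (l0.drop i) (l1.drop i)) n := by
  intro n
  induction n with
  | zero => intro i _; simp [prefLoop]
  | succ n ih =>
    intro i h
    have h0 : i < l0.length := by omega
    have h1 : i < l1.length := by omega
    have e0 : l0.drop i = l0[i] :: l0.drop (i+1) := List.drop_eq_getElem_cons h0
    have e1 : l1.drop i = l1[i] :: l1.drop (i+1) := List.drop_eq_getElem_cons h1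
    have g0 : PySem.List.pyGet? l0 (i : Int) = some l0[i] := by
      rw [PySem.List.pyGet?_natCast]; exact List.getElem?_eq_getElem h0
    have g1 : PySem.List.pyGet? l1 (i : Int) = some l1[i] := by
      rw [PySem.List.pyGet?_natCast]; exact List.getElem?_eq_getElem h1
    rw [show prefLoop l0 l1 i (n+1) =
        (if PySem.List.pyGet? l0 (i : Int) = PySem.List.pyGet? l1 (i : Int) then
          1 + prefLoop l0 l1 (i+1) n else 0) from rfl]
    rw [g0, g1, e0, e1]
    by_cases hc : l0[i] = l1[i]
    · rw [if_pos (by rw [hc]), ih (i+1) (by omega)]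
      simp only [lcp, if_pos hc]
      omega
    · rw [if_neg (by simpa using hc)]
      simp [lcp, hc]

theorem sufLoop_le (l0 l1 : List Char) : ∀ (n i : Nat), sufLoop l0 l1 i n ≤ n := by
  intro n
  induction n with
  | zero => intro i; simp [sufLoop]
  | succ n ih =>
    intro i
    rw [show sufLoop l0 l1 i (n+1) =
        (if PySem.List.pyGet? l0 (-(i : Int)) = PySem.List.pyGet? l1 (-(i : Int)) then
          1 + sufLoop l0 l1 (i+1) n else 0) from rfl]
    split
    · have := ih (i+1); omega
    · omega

theorem sufLoop_full (l0 l1 : List Char) :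
    ∀ (n i : Nat),
      (∀ j, i ≤ j → j < i + n →
        PySem.List.pyGet? l0 (-(j : Int)) = PySem.List.pyGet? l1 (-(j : Int))) →
      sufLoop l0 l1 i n = n := by
  intro n
  induction n with
  | zero => intro i _; simp [sufLoop]
  | succ n ih =>
    intro i h
    rw [show sufLoop l0 l1 i (n+1) =
        (if PySem.List.pyGet? l0 (-(i : Int)) = PySem.List.pyGet? l1 (-(i : Int)) then
          1 + sufLoop l0 l1 (i+1) n else 0) from rfl]
    rw [if_pos (h i le_rfl (by omega))]
    rw [ih (i+1) (fun j hj1 hj2 => h j (by omega) (by omega))]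
    omega

theorem findIdx?_eq_lcp : ∀ (l0 l1 : List Char),
    (l0.zip l1).findIdx? (fun ab => ab.1 != ab.2) =
      if lcp l0 l1 < min l0.length l1.length then some (lcp l0 l1) else none := by
  intro l0
  induction l0 with
  | nil => intro l1; simp [lcp]
  | cons a as ih =>
    intro l1
    cases l1 with
    | nil => simp [lcp]
    | cons b bs =>
      have hb := lcp_le as bs
      by_cases hab : a = b
      · subst hab
        have hl : lcp (a :: as) (a :: bs) = lcp as bs + 1 := by simp [lcp]
        rw [List.zip_cons_cons, List.findIdx?_cons, if_neg (by simp), ih bs, hl]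
        by_cases hlt : lcp as bs < min as.length bs.length
        · rw [if_pos hlt, if_pos (by simp only [List.length_cons]; omega)]; simp
        · rw [if_neg hlt, if_neg (by simp only [List.length_cons]; omega)]; simp
      · have hl : lcp (a :: as) (b :: bs) = 0 := by simp [lcp, hab]
        rw [List.zip_cons_cons, List.findIdx?_cons, if_pos (by simp [hab]), hl,
            if_pos (by simp only [List.length_cons]; omega)]

-- agreement of all negative-index reads follows from the aligned-suffix slice equality
theorem neg_reads_agree (l0 l1 : List Char) (p : Nat)
    (hle : l1.length ≤ l0.length) (hp : p ≤ l1.length)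
    (hd : l0.drop (p + (l0.length - l1.length)) = l1.drop p) :
    ∀ j, 1 ≤ j → j < 1 + (l1.length - p) →
      PySem.List.pyGet? l0 (-(j : Int)) = PySem.List.pyGet? l1 (-(j : Int)) := by
  intro j hj1 hj2
  have hj0 : j ≤ l0.length := by omega
  have hjl1 : j ≤ l1.length := by omega
  rw [PySem.List.pyGet?_neg_natCast l0 j hj1 hj0, PySem.List.pyGet?_neg_natCast l1 j hj1 hjl1]
  have e0 : l0.length - j = (p + (l0.length - l1.length)) + (l1.length - p - j) := by omega
  have e1 : l1.length - j = p + (l1.length - p - j) := by omega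
  rw [e0, e1, ← List.getElem?_drop, ← List.getElem?_drop, hd]

-- ===== VERDICT (by name: the statement is the Claim_ definition above) =====
theorem find_clipped_bounds_spec : Claim_equal_find_clipped_bounds := by
  intro s0 s1 _
  unfold Spec_find_clipped_bounds find_clipped_bounds find_clipped_bounds_alt
  set l0 := s0.toList with hl0
  set l1 := s1.toList with hl1
  by_cases hg1 : l1.length > l0.length
  · simp [hg1]
  by_cases hg2 : l0 = l1
  · simp [hg2]
  simp only [if_neg hg1, if_neg hg2]
  have hle : l1.length ≤ l0.length := by omega
  have hmin : min l0.length l1.length = l1.length := by omega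
  -- both prefix computations equal lcp l0 l1
  have hpl : lcp l0 l1 ≤ l1.length := by have := lcp_le l0 l1; omega
  have hpA : prefLoop l0 l1 0 (min l0.length l1.length) = lcp l0 l1 := by
    rw [prefLoop_eq_min l0 l1 (min l0.length l1.length) 0 (by omega)]
    simp only [List.drop_zero]
    have := lcp_le l0 l1; omega
  have hpB : (((l0.zip l1).findIdx? (fun ab => ab.1 != ab.2)).getD l1.length) = lcp l0 l1 := by
    rw [findIdx?_eq_lcp l0 l1]
    by_cases hlt : lcp l0 l1 < min l0.length l1.length
    · rw [if_pos hlt]; rfl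
    · rw [if_neg hlt]; simp only [Option.getD_none]; omega
  set p := lcp l0 l1 with hpdef
  -- rewrite B's slices
  have hBls : PySem.List.slice l0 (some ((p : Int) + ((l0.length : Int) - (l1.length : Int)))) none
      = l0.drop (p + (l0.length - l1.length)) := by
    have : (p : Int) + ((l0.length : Int) - (l1.length : Int))
        = ((p + (l0.length - l1.length) : Nat) : Int) := by push_cast [hle]; ring
    rw [this, PySem.List.slice_from_natCast]
  have hBrs : PySem.List.slice l1 (some ((p : Int))) none = l1.drop p :=
    PySem.List.slice_from_natCast _ _
  rw [hpA, hpB, hBls, hBrs]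
  by_cases hB : l0.drop (p + (l0.length - l1.length)) = l1.drop p
  · -- B succeeds; show A's suffix loop runs full and the reconstruction matches
    have hfull : sufLoop l0 l1 1 (min l0.length l1.length - p) = l1.length - p := by
      rw [hmin]
      exact sufLoop_full l0 l1 (l1.length - p) 1 (neg_reads_agree l0 l1 p hle hpl hB)
    rw [hmin] at hfull ⊢
    rw [hfull]
    have hcast : ((l0.length : Int) - ((l1.length - p : Nat) : Int) - 1) + 1
        = ((p + (l0.length - l1.length) : Nat) : Int) := by push_cast [hle, hpl]; ring
    have hrec : PySem.List.slice l0 none (some ((p : Int))) ++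
        PySem.List.slice l0 (some (((l0.length : Int) - ((l1.length - p : Nat) : Int) - 1) + 1)) none = l1 := by
      rw [hcast, PySem.List.slice_to_natCast, PySem.List.slice_from_natCast]
      have htk : l0.take p = l1.take p := by
        have := take_lcp l0 l1; rwa [← hpdef] at this
      rw [htk, hB, List.take_append_drop]
    rw [if_neg (by simpa using hrec), if_pos hB]
    have : (l0.length : Int) - ((l1.length - p : Nat) : Int) - 1
        = (p : Int) + ((l0.length : Int) - (l1.length : Int)) - 1 := by
      push_cast [hpl]; ring
    rw [this]
  · -- B fails; show A's reconstruction cannot equal l1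
    rw [if_neg hB]
    set s := sufLoop l0 l1 1 (min l0.length l1.length - p) with hsdef
    have hs_le : s ≤ l1.length - p := by
      have := sufLoop_le l0 l1 (min l0.length l1.length - p) 1; omega
    have hcast : ((l0.length : Int) - (s : Int) - 1) + 1 = ((l0.length - s : Nat) : Int) := by
      push_cast [show s ≤ l0.length by omega]; ring
    rw [if_pos]
    intro hrec
    rw [hcast, PySem.List.slice_to_natCast, PySem.List.slice_from_natCast] at hrec
    -- length forces the suffix to be complete
    have hlen : p + s = l1.length := by
      have := congrArg List.length hrec
      simp only [List.length_append, List.length_take, List.length_drop] at this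
      omega
    have hds : l0.length - s = p + (l0.length - l1.length) := by omega
    have htk : l0.take p = l1.take p := by
      have := take_lcp l0 l1; rwa [← hpdef] at this
    rw [hds, htk] at hrec
    apply hB
    have : l1.take p ++ l0.drop (p + (l0.length - l1.length)) = l1.take p ++ l1.drop p := by
      rw [hrec, List.take_append_drop]
    exact List.append_cancel_left this
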